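-- pv_equiv track=rewrite | github.com/kimyh4306/Morse-Bott | Morse_Bott.py | SSConverter
-- ===== SOURCE A (Python) =====
-- def SSConverter (a):
-- #Rearranges Index of Spectral Sequence
--     SS = []
--     index = []
--     temp = 0
--     for i in range(len(a)):
--         index.append(a[i][0] + a[i][1])
--     mi = min(index)
--     ma = max(index)
--     for i in range(ma-mi+1):
--         SS.append([])
--     for i in range(len(a)):
--         temp = a[i][0] + a[i][1]
--         SS[temp-mi].append(a[i])
--     return SS
-- ===== SOURCE B (Python) =====
-- def SSConverter(a):
--     # Per-bucket rescan: find the min and max coordinate sum, then build each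
--     # bucket s in [mi, ma] directly as a filter of the input for that sum.
--     # No preallocation, no scatter-by-offset; original order within a bucket
--     # is preserved because filter keeps input order.
--     mi = min(x + y for (x, y) in a)
--     ma = max(x + y for (x, y) in a)
--     return [[p for p in a if p[0] + p[1] == s] for s in range(mi, ma + 1)]
-- ===== Notes on version B (the rewrite author's own statement) =====
-- stated objective: simpler
-- what changed: Instead of computing a sums list, preallocating ma-mi+1 empty buckets and scatter-appending each element at offset sum-mi, B takes min/max of the sums and builds each bucket by rescanning the input with a filter for that sum (nested scans instead of a single scatter pass).
import Mathlib
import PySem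

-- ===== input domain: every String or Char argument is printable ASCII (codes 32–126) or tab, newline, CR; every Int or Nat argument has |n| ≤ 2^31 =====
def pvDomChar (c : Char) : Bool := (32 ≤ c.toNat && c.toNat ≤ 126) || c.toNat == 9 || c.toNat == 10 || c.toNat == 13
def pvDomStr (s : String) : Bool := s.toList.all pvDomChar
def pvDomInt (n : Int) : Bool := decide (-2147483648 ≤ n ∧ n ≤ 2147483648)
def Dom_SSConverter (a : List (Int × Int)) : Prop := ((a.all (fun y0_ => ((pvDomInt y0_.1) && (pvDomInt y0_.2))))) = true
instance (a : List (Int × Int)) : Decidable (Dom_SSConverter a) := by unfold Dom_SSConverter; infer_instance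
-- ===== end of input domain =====

-- B replaces A's preallocate-and-scatter-by-offset construction by taking
-- min/max of the sums and building each bucket as a direct filter of the
-- input for that sum; objective: simpler.

-- ===== PORT A =====
-- SS[temp-mi].append(a[i]): in-place append at an index; exact for the
-- indices A's loop produces (0 ≤ i < len SS; out of range it is never called).
def pvAppendAt (xs : List (List (Int × Int))) (i : Int) (v : Int × Int) :
    List (List (Int × Int)) :=
  match xs with
  | [] => []
  | h :: t => if i = 0 then (h ++ [v]) :: t else h :: pvAppendAt t (i - 1) v

def SSConverter (a : List (Int × Int)) : List (List (Int × Int)) :=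
  let index := (PySem.List.pyRange 0 a.length 1).foldl
    (fun idx i =>
      idx ++ [(PySem.List.pyGetD a i (0, 0)).1 + (PySem.List.pyGetD a i (0, 0)).2]) []
  match PySem.List.min? index (fun x => x), PySem.List.max? index (fun x => x) with
  | some mi, some ma =>
      let SS := (PySem.List.pyRange 0 (ma - mi + 1) 1).foldl (fun SS _ => SS ++ [[]]) []
      (PySem.List.pyRange 0 a.length 1).foldl
        (fun SS i =>
          let temp := (PySem.List.pyGetD a i (0, 0)).1 + (PySem.List.pyGetD a i (0, 0)).2
          pvAppendAt SS (temp - mi) (PySem.List.pyGetD a i (0, 0))) SS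
  | _, _ => []  -- min()/max() of the empty sum list raise ValueError; excluded by Pre_

-- ===== PORT B =====
def SSConverter_alt (a : List (Int × Int)) : List (List (Int × Int)) :=
  match PySem.List.min? (a.map (fun p => p.1 + p.2)) (fun x => x) with
  | none => []  -- min() of an empty generator raises ValueError; excluded by Pre_
  | some mi =>
    match PySem.List.max? (a.map (fun p => p.1 + p.2)) (fun x => x) with
    | none => []
    | some ma =>
      (PySem.List.pyRange mi (ma + 1) 1).map
        (fun s => a.filter (fun p => p.1 + p.2 == s))

-- ===== PRECONDITION & SPEC =====
-- On the empty list both Pythons raise ValueError (min of an empty sequence).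
def Pre_SSConverter (a : List (Int × Int)) : Prop := a ≠ []
instance (a : List (Int × Int)) : Decidable (Pre_SSConverter a) := by
  unfold Pre_SSConverter; infer_instance
def pvWitness_SSConverter : (List (Int × Int)) := [(0, 1), (2, 2)]

def Spec_SSConverter (a : List (Int × Int)) (out : List (List (Int × Int))) : Prop :=
  out = SSConverter_alt a
instance (a : List (Int × Int)) (out : List (List (Int × Int))) :
    Decidable (Spec_SSConverter a out) := by unfold Spec_SSConverter; infer_instance

-- ===== CLAIM (what is proved, stated in full; the proofs are below) =====
def Claim_equal_SSConverter : Prop :=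
  ∀ (a : List (Int × Int)), Dom_SSConverter a → Pre_SSConverter a →
    Spec_SSConverter a (SSConverter a)

-- ===== LEMMAS AND PROOFS =====

theorem pv_foldl_append_singleton (l : List (Int × Int)) (g : Int × Int → Int)
    (acc : List Int) :
    l.foldl (fun acc x => acc ++ [g x]) acc = acc ++ l.map g := by
  induction l generalizing acc with
  | nil => simp
  | cons h t ih => simp [ih]

theorem pv_foldl_const_append (l : List Int) (init : List (List (Int × Int))) :
    l.foldl (fun S _ => S ++ [([] : List (Int × Int))]) init
      = init ++ List.replicate l.length [] := by
  induction l generalizing init with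
  | nil => simp
  | cons h t ih => simp [ih, List.replicate_succ]

theorem pv_getElem?_pvAppendAt (xs : List (List (Int × Int))) (i : Int)
    (v : Int × Int) (j : Nat) :
    (pvAppendAt xs i v)[j]? =
      if (j : Int) = i then (xs[j]?).map (· ++ [v]) else xs[j]? := by
  induction xs generalizing i j with
  | nil => simp [pvAppendAt]
  | cons h t ih =>
    by_cases hi : i = 0
    · subst hi
      have hred : pvAppendAt (h :: t) 0 v = (h ++ [v]) :: t := by simp [pvAppendAt]
      rw [hred]
      cases j with
      | zero => simp
      | succ j => rw [if_neg (by omega)]; simp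
    · have hred : pvAppendAt (h :: t) i v = h :: pvAppendAt t (i - 1) v := by
        simp [pvAppendAt, hi]
      rw [hred]
      cases j with
      | zero => rw [if_neg (by omega)]; simp
      | succ j =>
        simp only [List.getElem?_cons_succ, ih]
        by_cases hji : (j : Int) = i - 1
        · rw [if_pos hji, if_pos (by omega)]
        · rw [if_neg hji, if_neg (by omega)]

theorem pv_scatter (mi : Int) (l : List (Int × Int)) :
    ∀ (SS : List (List (Int × Int))) (j : Nat),
      (l.foldl (fun S p => pvAppendAt S (p.1 + p.2 - mi) p) SS)[j]? =
        (SS[j]?).map (· ++ l.filter (fun p => p.1 + p.2 == mi + (j : Int))) := by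
  induction l with
  | nil => intro SS j; cases h : SS[j]? <;> simp [h]
  | cons p t ih =>
    intro SS j
    simp only [List.foldl_cons, ih, pv_getElem?_pvAppendAt, List.filter_cons]
    by_cases hc : (j : Int) = p.1 + p.2 - mi
    · have hb : (p.1 + p.2 == mi + (j : Int)) = true := by
        simp [beq_iff_eq]; omega
      cases h : SS[j]? <;> simp [hc]
    · have hb : (p.1 + p.2 == mi + (j : Int)) = false := by
        simp; omega
      cases h : SS[j]? <;> simp [hc, hb]

-- ===== VERDICT (by name: the statement is the Claim_ definition above) =====
theorem SSConverter_spec : Claim_equal_SSConverter := by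
  intro a _ hpre
  have hsne : a.map (fun p => p.1 + p.2) ≠ [] := by
    simpa using hpre
  have hidx : (PySem.List.pyRange 0 a.length 1).foldl
      (fun idx i =>
        idx ++ [(PySem.List.pyGetD a i (0, 0)).1 + (PySem.List.pyGetD a i (0, 0)).2]) []
      = a.map (fun p => p.1 + p.2) := by
    rw [PySem.List.foldl_pyRange_zero_pyGetD' a (0, 0)
      (fun idx p => idx ++ [p.1 + p.2]) []]
    exact pv_foldl_append_singleton a _ []
  obtain ⟨mi, hmi⟩ : ∃ m, PySem.List.min? (a.map (fun p => p.1 + p.2)) (fun x => x) = some m := by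
    cases h : PySem.List.min? (a.map (fun p => p.1 + p.2)) (fun x => x) with
    | none => exact absurd ((PySem.List.min?_eq_none_iff _ _).mp h) hsne
    | some m => exact ⟨m, rfl⟩
  obtain ⟨ma, hma⟩ : ∃ m, PySem.List.max? (a.map (fun p => p.1 + p.2)) (fun x => x) = some m := by
    cases h : PySem.List.max? (a.map (fun p => p.1 + p.2)) (fun x => x) with
    | none => exact absurd ((PySem.List.max?_eq_none_iff _ _).mp h) hsne
    | some m => exact ⟨m, rfl⟩
  unfold Spec_SSConverter SSConverter SSConverter_alt
  simp only [hidx, hmi, hma]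
  rw [PySem.List.foldl_pyRange_zero_pyGetD' a (0, 0)
        (fun S p => pvAppendAt S (p.1 + p.2 - mi) p),
      pv_foldl_const_append]
  simp only [List.nil_append]
  apply List.ext_getElem?
  intro j
  rw [pv_scatter]
  by_cases hj : j < (ma + 1 - mi).toNat
  · rw [List.getElem?_replicate, if_pos (by
      simp only [PySem.List.length_pyRange_one]; omega)]
    rw [List.getElem?_map, PySem.List.getElem?_pyRange_one]
    simp [hj]
  · rw [List.getElem?_replicate, if_neg (by
      simp only [PySem.List.length_pyRange_one]; omega)]
    rw [List.getElem?_map, PySem.List.getElem?_pyRange_one]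
    simp [hj]
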